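-- pv_equiv track=rewrite | github.com/musikalkemist/generativemusicaicourse | Code/markovchain.py | _snap_midi_to_pitch_classes
-- ===== SOURCE A (Python) =====
-- def _snap_midi_to_pitch_classes(midi_value, pitch_classes):
--     if midi_value % 12 in pitch_classes:
--         return midi_value
--     best = midi_value
--     best_distance = 128
--     for candidate in range(128):
--         if candidate % 12 in pitch_classes:
--             distance = abs(candidate - midi_value)
--             if distance < best_distance:
--                 best = candidate
--                 best_distance = distance
--     return best
-- ===== SOURCE B (Python) =====
-- def _snap_midi_to_pitch_classes(midi_value, pitch_classes):
--     if midi_value % 12 in pitch_classes: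
--         return midi_value
--     for d in range(1, 128):
--         for c in (midi_value - d, midi_value + d):
--             if 0 <= c <= 127 and c % 12 in pitch_classes:
--                 return c
--     return midi_value
-- ===== Notes on version B (the rewrite author's own statement) =====
-- stated objective: alternative
-- what changed: Replaces A's full scan over all 128 MIDI values with running (best,best_distance) accumulators by an outward search from midi_value that tries distance d=1,2,... (lower candidate before upper, preserving the tie-break) and returns the first in-range hit.
import Mathlib
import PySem

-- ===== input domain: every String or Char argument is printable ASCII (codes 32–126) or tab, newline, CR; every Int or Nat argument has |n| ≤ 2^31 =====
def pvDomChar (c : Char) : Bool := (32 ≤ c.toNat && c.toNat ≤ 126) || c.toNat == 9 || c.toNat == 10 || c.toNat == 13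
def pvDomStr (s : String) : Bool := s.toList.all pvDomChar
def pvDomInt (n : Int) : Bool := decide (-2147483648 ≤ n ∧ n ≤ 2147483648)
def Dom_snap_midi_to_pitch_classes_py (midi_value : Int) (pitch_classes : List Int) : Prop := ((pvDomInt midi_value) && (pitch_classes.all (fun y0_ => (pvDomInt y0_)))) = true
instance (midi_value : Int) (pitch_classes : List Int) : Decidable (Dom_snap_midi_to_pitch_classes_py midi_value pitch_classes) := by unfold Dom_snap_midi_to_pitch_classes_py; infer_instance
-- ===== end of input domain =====

-- B replaces A's full 0..127 minimum-tracking scan by an outward search from midi_value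
-- (lower candidate first, so the tie-break and all return values are identical); objective: alternative.

-- ===== PORT A =====
-- loop body of A: track (best, best_distance)
def snapStep (midi_value : Int) (pitch_classes : List Int) (st : Int × Int) (candidate : Int) : Int × Int :=
  if PySem.Int.mod candidate 12 ∈ pitch_classes then
    let distance := |candidate - midi_value|
    if distance < st.2 then (candidate, distance) else st
  else st

def snap_midi_to_pitch_classes_py (midi_value : Int) (pitch_classes : List Int) : Int :=
  if PySem.Int.mod midi_value 12 ∈ pitch_classes then midi_value
  else ((PySem.List.pyRange 0 128 1).foldl (snapStep midi_value pitch_classes) (midi_value, 128)).1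

-- ===== PORT B =====
-- B's loop `for d in range(1, 128): try midi_value-d then midi_value+d`
def snapOutward (midi_value : Int) (pitch_classes : List Int) (d : Nat) : Int :=
  if h : d < 128 then
    if 0 ≤ midi_value - (d : Int) ∧ midi_value - (d : Int) ≤ 127 ∧ PySem.Int.mod (midi_value - (d : Int)) 12 ∈ pitch_classes then
      midi_value - (d : Int)
    else if 0 ≤ midi_value + (d : Int) ∧ midi_value + (d : Int) ≤ 127 ∧ PySem.Int.mod (midi_value + (d : Int)) 12 ∈ pitch_classes then
      midi_value + (d : Int)
    else snapOutward midi_value pitch_classes (d + 1)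
  else midi_value
termination_by 128 - d

def snap_midi_to_pitch_classes_py_alt (midi_value : Int) (pitch_classes : List Int) : Int :=
  if PySem.Int.mod midi_value 12 ∈ pitch_classes then midi_value
  else snapOutward midi_value pitch_classes 1

-- ===== PRECONDITION & SPEC =====
def Spec_snap_midi_to_pitch_classes_py (midi_value : Int) (pitch_classes : List Int) (out : Int) : Prop := out = snap_midi_to_pitch_classes_py_alt midi_value pitch_classes
instance (midi_value : Int) (pitch_classes : List Int) (out : Int) : Decidable (Spec_snap_midi_to_pitch_classes_py midi_value pitch_classes out) := by unfold Spec_snap_midi_to_pitch_classes_py; infer_instance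

-- ===== CLAIM (what is proved, stated in full; the proofs are below) =====
def Claim_equal_snap_midi_to_pitch_classes_py : Prop := ∀ (midi_value : Int) (pitch_classes : List Int), Dom_snap_midi_to_pitch_classes_py midi_value pitch_classes → Spec_snap_midi_to_pitch_classes_py midi_value pitch_classes (snap_midi_to_pitch_classes_py midi_value pitch_classes)

-- ===== LEMMAS AND PROOFS =====

-- a legal snapping target: in MIDI range with an allowed pitch class
def okCand (pitch_classes : List Int) (c : Int) : Prop :=
  0 ≤ c ∧ c ≤ 127 ∧ PySem.Int.mod c 12 ∈ pitch_classes

-- r is THE answer when a near candidate exists: legal, within 127, of minimal distance, lowest on ties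
def Good (midi_value : Int) (pitch_classes : List Int) (r : Int) : Prop :=
  okCand pitch_classes r ∧ |r - midi_value| ≤ 127 ∧
  (∀ c, okCand pitch_classes c → |r - midi_value| ≤ |c - midi_value|) ∧
  (∀ c, okCand pitch_classes c → |c - midi_value| = |r - midi_value| → r ≤ c)

-- no legal candidate lies within distance 127
def NoNear (midi_value : Int) (pitch_classes : List Int) : Prop :=
  ∀ c, okCand pitch_classes c → 128 ≤ |c - midi_value|

theorem good_unique (m : Int) (pcs : List Int) (r1 r2 : Int)
    (h1 : Good m pcs r1) (h2 : Good m pcs r2) : r1 = r2 := by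
  obtain ⟨ok1, -, min1, tie1⟩ := h1
  obtain ⟨ok2, -, min2, tie2⟩ := h2
  have e : |r1 - m| = |r2 - m| := le_antisymm (min1 r2 ok2) (min2 r1 ok1)
  have t1 := tie1 r2 ok2 e.symm
  have t2 := tie2 r1 ok1 e
  omega

theorem good_not_noNear (m : Int) (pcs : List Int) (r : Int)
    (hg : Good m pcs r) (hn : NoNear m pcs) : False := by
  have h1 := hg.2.1
  have h2 := hn r hg.1
  omega

def AInv (m : Int) (pcs : List Int) (n : Nat) (st : Int × Int) : Prop :=
  (st = (m, 128) ∧ ∀ c : Int, 0 ≤ c → c < (n : Int) → PySem.Int.mod c 12 ∈ pcs → 128 ≤ |c - m|) ∨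
  (0 ≤ st.1 ∧ st.1 < (n : Int) ∧ PySem.Int.mod st.1 12 ∈ pcs ∧ st.2 = |st.1 - m| ∧ st.2 < 128 ∧
   (∀ c : Int, 0 ≤ c → c < (n : Int) → PySem.Int.mod c 12 ∈ pcs → st.2 ≤ |c - m|) ∧
   (∀ c : Int, 0 ≤ c → c < (n : Int) → PySem.Int.mod c 12 ∈ pcs → |c - m| = st.2 → st.1 ≤ c))

theorem aFold_inv (m : Int) (pcs : List Int) (n : Nat) (hn : n ≤ 128) :
    AInv m pcs n ((PySem.List.pyRange 0 (n : Int) 1).foldl (snapStep m pcs) (m, 128)) := by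
  induction n with
  | zero =>
    rw [show ((0 : Nat) : Int) = 0 by norm_num, PySem.List.pyRange_one_eq_nil le_rfl]
    exact Or.inl ⟨rfl, fun c h1 h2 _ => by exfalso; omega⟩
  | succ n ih =>
    have hI := ih (by omega)
    have hcast : ((n + 1 : Nat) : Int) = (n : Int) + 1 := by push_cast; ring
    rw [hcast, PySem.List.pyRange_one_succ_right (by positivity), List.foldl_append,
        List.foldl_cons, List.foldl_nil]
    set st := (PySem.List.pyRange 0 (n : Int) 1).foldl (snapStep m pcs) (m, 128) with hst
    unfold AInv at hI ⊢
    simp only [snapStep]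
    rcases hI with ⟨hstv, hall⟩ | ⟨hb0, hb1, hbp, hbd, hblt, hmin, htie⟩
    · rw [hstv]
      split_ifs with hp hlt
      · -- first allowed candidate within distance 128
        simp only at hlt
        refine Or.inr ⟨by omega, by omega, hp, rfl, hlt, ?_, ?_⟩
        · intro c h0 hcn hp'
          rcases (by omega : c < (n : Int) ∨ c = n) with hc | hc
          · have := hall c h0 hc hp'
            simp only [Int.abs_eq_natAbs] at *; omega
          · subst hc
            simp only [Int.abs_eq_natAbs]; omega
        · intro c h0 hcn hp' he
          rcases (by omega : c < (n : Int) ∨ c = n) with hc | hc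
          · have := hall c h0 hc hp'
            simp only [Int.abs_eq_natAbs] at *; omega
          · omega
      · -- allowed but not nearer than 128
        simp only at hlt
        refine Or.inl ⟨rfl, ?_⟩
        intro c h0 hcn hp'
        rcases (by omega : c < (n : Int) ∨ c = n) with hc | hc
        · exact hall c h0 hc hp'
        · subst hc
          simp only [Int.abs_eq_natAbs] at *; omega
      · -- pitch class not allowed
        refine Or.inl ⟨rfl, ?_⟩
        intro c h0 hcn hp'
        rcases (by omega : c < (n : Int) ∨ c = n) with hc | hc
        · exact hall c h0 hc hp'
        · exact absurd (hc ▸ hp') hp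
    · split_ifs with hp hlt
      · -- improvement over current best
        simp only at hlt
        refine Or.inr ⟨by omega, by omega, hp, rfl, ?_, ?_, ?_⟩
        · simp only [Int.abs_eq_natAbs] at *; omega
        · intro c h0 hcn hp'
          rcases (by omega : c < (n : Int) ∨ c = n) with hc | hc
          · have := hmin c h0 hc hp'
            simp only [Int.abs_eq_natAbs] at *; omega
          · subst hc
            simp only [Int.abs_eq_natAbs]; omega
        · intro c h0 hcn hp' he
          rcases (by omega : c < (n : Int) ∨ c = n) with hc | hc
          · have := hmin c h0 hc hp'
            simp only [Int.abs_eq_natAbs] at *; omega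
          · omega
      · -- allowed but no improvement
        simp only at hlt
        refine Or.inr ⟨hb0, by omega, hbp, hbd, hblt, ?_, ?_⟩
        · intro c h0 hcn hp'
          rcases (by omega : c < (n : Int) ∨ c = n) with hc | hc
          · exact hmin c h0 hc hp'
          · subst hc
            simp only [Int.abs_eq_natAbs] at *; omega
        · intro c h0 hcn hp' he
          rcases (by omega : c < (n : Int) ∨ c = n) with hc | hc
          · exact htie c h0 hc hp' he
          · omega
      · -- pitch class not allowed
        refine Or.inr ⟨hb0, by omega, hbp, hbd, hblt, ?_, ?_⟩
        · intro c h0 hcn hp'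
          rcases (by omega : c < (n : Int) ∨ c = n) with hc | hc
          · exact hmin c h0 hc hp'
          · exact absurd (hc ▸ hp') hp
        · intro c h0 hcn hp' he
          rcases (by omega : c < (n : Int) ∨ c = n) with hc | hc
          · exact htie c h0 hc hp' he
          · exact absurd (hc ▸ hp') hp

theorem a_spec (m : Int) (pcs : List Int) (hmem : PySem.Int.mod m 12 ∉ pcs) :
    (snap_midi_to_pitch_classes_py m pcs = m ∧ NoNear m pcs) ∨
    Good m pcs (snap_midi_to_pitch_classes_py m pcs) := by
  unfold snap_midi_to_pitch_classes_py
  rw [if_neg hmem]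
  have hI := aFold_inv m pcs 128 le_rfl
  rw [show ((128 : Nat) : Int) = 128 by norm_num] at hI
  unfold AInv at hI
  unfold Good NoNear okCand
  rcases hI with ⟨hstv, hall⟩ | ⟨hb0, hb1, hbp, hbd, hblt, hmin, htie⟩
  · rw [hstv]
    refine Or.inl ⟨rfl, ?_⟩
    intro c ⟨hc0, hc1, hcp⟩
    exact hall c hc0 (by omega) hcp
  · refine Or.inr ⟨⟨hb0, by omega, hbp⟩, ?_, ?_, ?_⟩
    · simp only [Int.abs_eq_natAbs] at *; omega
    · intro c ⟨hc0, hc1, hcp⟩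
      have := hmin c hc0 (by omega) hcp
      simp only [Int.abs_eq_natAbs] at *; omega
    · intro c ⟨hc0, hc1, hcp⟩ he
      refine htie c hc0 (by omega) hcp ?_
      simp only [Int.abs_eq_natAbs] at *; omega

theorem b_spec_aux (m : Int) (pcs : List Int) : ∀ (k d : Nat), d + k = 128 → 1 ≤ d →
    (∀ c, okCand pcs c → |c - m| < (d : Int) → False) →
    (snapOutward m pcs d = m ∧ NoNear m pcs) ∨ Good m pcs (snapOutward m pcs d) := by
  intro k
  induction k with
  | zero =>
    intro d hd _ hfar
    have hd' : d = 128 := by omega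
    subst hd'
    rw [snapOutward, dif_neg (by omega : ¬ (128 < 128))]
    refine Or.inl ⟨rfl, ?_⟩
    intro c hc
    by_contra hlt
    refine hfar c hc ?_
    simp only [Int.abs_eq_natAbs] at hlt ⊢; omega
  | succ k ih =>
    intro d hd hd1 hfar
    have hdlt : d < 128 := by omega
    rw [snapOutward, dif_pos hdlt]
    unfold Good NoNear
    split_ifs with h1 h2
    · -- lower candidate hits: it is the unique nearest
      refine Or.inr ⟨⟨h1.1, h1.2.1, h1.2.2⟩, ?_, ?_, ?_⟩
      · simp only [Int.abs_eq_natAbs]; omega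
      · intro c hc
        by_contra hlt
        refine hfar c hc ?_
        simp only [Int.abs_eq_natAbs] at *; omega
      · intro c hc he
        simp only [Int.abs_eq_natAbs] at he; omega
    · -- upper candidate hits; a tie with the lower one is impossible since it failed
      refine Or.inr ⟨⟨h2.1, h2.2.1, h2.2.2⟩, ?_, ?_, ?_⟩
      · simp only [Int.abs_eq_natAbs]; omega
      · intro c hc
        by_contra hlt
        refine hfar c hc ?_
        simp only [Int.abs_eq_natAbs] at *; omega
      · intro c hc he
        simp only [Int.abs_eq_natAbs] at he
        rcases (by omega : c = m - (d : Int) ∨ c = m + (d : Int)) with hcc | hcc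
        · exact absurd ⟨hcc ▸ hc.1, hcc ▸ hc.2.1, hcc ▸ hc.2.2⟩ h1
        · omega
    · -- widen the search radius
      refine ih (d + 1) (by omega) (by omega) ?_
      intro c hc hlt
      simp only [Int.abs_eq_natAbs] at hlt
      rcases (by omega : ((c - m).natAbs : Int) < (d : Int) ∨ ((c - m).natAbs : Int) = (d : Int)) with hl | he
      · refine hfar c hc ?_
        simp only [Int.abs_eq_natAbs]; omega
      · rcases (by omega : c = m - (d : Int) ∨ c = m + (d : Int)) with hcc | hcc
        · exact h1 ⟨hcc ▸ hc.1, hcc ▸ hc.2.1, hcc ▸ hc.2.2⟩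
        · exact h2 ⟨hcc ▸ hc.1, hcc ▸ hc.2.1, hcc ▸ hc.2.2⟩

theorem b_spec (m : Int) (pcs : List Int) (hmem : PySem.Int.mod m 12 ∉ pcs) :
    (snap_midi_to_pitch_classes_py_alt m pcs = m ∧ NoNear m pcs) ∨
    Good m pcs (snap_midi_to_pitch_classes_py_alt m pcs) := by
  unfold snap_midi_to_pitch_classes_py_alt
  rw [if_neg hmem]
  refine b_spec_aux m pcs 127 1 rfl le_rfl ?_
  intro c hc hlt
  have : c = m := by simp only [Int.abs_eq_natAbs] at hlt; omega
  exact hmem (this ▸ hc.2.2)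

-- ===== VERDICT (by name: the statement is the Claim_ definition above) =====
theorem snap_midi_to_pitch_classes_py_spec : Claim_equal_snap_midi_to_pitch_classes_py := by
  intro m pcs _
  unfold Spec_snap_midi_to_pitch_classes_py
  by_cases hmem : PySem.Int.mod m 12 ∈ pcs
  · simp only [snap_midi_to_pitch_classes_py, snap_midi_to_pitch_classes_py_alt, if_pos hmem]
  · rcases a_spec m pcs hmem with ⟨ha, hna⟩ | hga <;>
      rcases b_spec m pcs hmem with ⟨hb, hnb⟩ | hgb
    · rw [ha, hb]
    · exact absurd hgb (fun h => good_not_noNear m pcs _ h hna)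
    · exact absurd hga (fun h => good_not_noNear m pcs _ h hnb)
    · exact good_unique m pcs _ _ hga hgb
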